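-- pv_equiv track=rewrite | github.com/ayredev/Enhanced | enhanced/lsp/definition.py | _word_at
-- ===== SOURCE A (Python) =====
-- def _word_at(line, col):
--     """Extract the word at column position."""
--     if col >= len(line):
--         col = max(0, len(line) - 1)
--     if not line or not (line[col].isalnum() or line[col] == '_'):
--         return None
--
--     start = col
--     while start > 0 and (line[start - 1].isalnum() or line[start - 1] == '_'):
--         start -= 1
--     end = col
--     while end < len(line) and (line[end].isalnum() or line[end] == '_'):
--         end += 1
--     return line[start:end] if start < end else None
-- ===== SOURCE B (Python) =====
-- def _word_at(line, col):
--     """Extract the word at column position."""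
--     n = len(line)
--     if col >= n:
--         col = max(0, n - 1)
--     # one forward pass: collect maximal runs of word characters as (start, end) spans
--     spans = []
--     i = 0
--     while i < n:
--         if line[i].isalnum() or line[i] == '_':
--             j = i + 1
--             while j < n and (line[j].isalnum() or line[j] == '_'):
--                 j += 1
--             spans.append((i, j))
--             i = j
--         else:
--             i += 1
--     for s, e in spans:
--         if s <= col < e:
--             return line[s:e]
--     return None
-- ===== Notes on version B (the rewrite author's own statement) =====
-- stated objective: alternative
-- what changed: Replaces A's two directional while-loops around col by a single forward scan that collects all maximal word-character runs as (start,end) spans and then returns the span containing col; same clamp of col past end of line.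
-- intended difference: For a negative in-range col that lands (after Python's negative-index wraparound) on a word character, A returns an accidental slice (the empty string or a wrapped word, e.g. _word_at('a', -1) == 'a'), while B returns None, the intended answer for a column that is not a valid position; outside that region the two agree. — e.g. on _word_at("a", -1): A returns some "a", B returns none
import Mathlib
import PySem

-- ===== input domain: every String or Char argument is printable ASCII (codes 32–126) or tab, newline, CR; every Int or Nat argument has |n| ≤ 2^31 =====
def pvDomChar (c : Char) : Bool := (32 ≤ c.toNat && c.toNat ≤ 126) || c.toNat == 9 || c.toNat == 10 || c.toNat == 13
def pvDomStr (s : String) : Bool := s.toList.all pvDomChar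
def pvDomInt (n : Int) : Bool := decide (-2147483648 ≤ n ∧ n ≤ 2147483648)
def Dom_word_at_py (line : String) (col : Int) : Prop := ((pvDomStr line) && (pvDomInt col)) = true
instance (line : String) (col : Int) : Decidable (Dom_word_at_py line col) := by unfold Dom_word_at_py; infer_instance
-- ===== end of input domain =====

-- B replaces A's two directional while-loops around col by one forward pass collecting the
-- maximal word-character runs as (start, end) spans and returning the span containing col
-- (objective: alternative decomposition, same cost). Return values only; neither side mutates.

-- ===== PORT A =====
-- word-character test: c.isalnum() or c == '_'
def pvW (c : Char) : Bool := PySem.Chars.isalnum c || c == '_'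

-- while start > 0 and (line[start-1].isalnum() or line[start-1] == '_'): start -= 1
def pvABack (l : List Char) (s : Int) : Int :=
  if h : 0 < s ∧ (match PySem.List.pyGet? l (s - 1) with | some c => pvW c | none => false) = true then
    pvABack l (s - 1)
  else s
termination_by s.toNat
decreasing_by omega

-- while end < len(line) and (line[end].isalnum() or line[end] == '_'): end += 1
-- (line[end] via pyGet?: Python's negative-index wraparound is kept)
def pvAFwd (l : List Char) (e : Int) : Int :=
  if h : e < (l.length : Int) ∧ (match PySem.List.pyGet? l e with | some c => pvW c | none => false) = true then
    pvAFwd l (e + 1)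
  else e
termination_by ((l.length : Int) - e).toNat
decreasing_by omega

def word_at_py (line : String) (col : Int) : Option String :=
  let l := line.toList
  let n : Int := l.length
  let col := if col ≥ n then max 0 (n - 1) else col
  if l = [] then none
  else
    match PySem.List.pyGet? l col with
    | none => none   -- line[col] raises IndexError in Python; these inputs are outside Pre_
    | some c =>
      if pvW c then
        let s := pvABack l col
        let e := pvAFwd l col
        if s < e then some (String.ofList (PySem.List.slice l (some s) (some e))) else none
      else none

-- ===== PORT B =====
-- inner loop: j = i + 1; while j < n and (line[j].isalnum() or line[j] == '_'): j += 1
def pvScanW (l : List Char) (j : Nat) : Nat :=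
  if h : j < l.length then
    if pvW l[j] = true then pvScanW l (j + 1) else j
  else j
termination_by l.length - j
decreasing_by omega

-- lemma the outer loop's termination cites
theorem pvScanW_ge (l : List Char) (j : Nat) : j ≤ pvScanW l j := by
  fun_induction pvScanW l j <;> omega

-- outer loop: collect the maximal word-character runs of line as (start, end) spans
def pvSpans (l : List Char) (i : Nat) : List (Nat × Nat) :=
  if h : i < l.length then
    if pvW l[i] = true then
      let j := pvScanW l (i + 1)
      (i, j) :: pvSpans l j
    else pvSpans l (i + 1)
  else []
termination_by l.length - i
decreasing_by
  · have := pvScanW_ge l (i + 1); omega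
  · omega

def word_at_py_alt (line : String) (col : Int) : Option String :=
  let l := line.toList
  let n : Int := l.length
  let col := if col ≥ n then max 0 (n - 1) else col
  match (pvSpans l 0).find? (fun p => decide ((p.1 : Int) ≤ col ∧ col < (p.2 : Int))) with
  | some p => some (String.ofList ((l.drop p.1).take (p.2 - p.1)))
  | none => none

-- ===== PRECONDITION & SPEC =====
-- Pre_ excludes exactly the inputs where Python A raises IndexError: nonempty line with col < -len(line).
def Pre_word_at_py (line : String) (col : Int) : Prop :=
  line.toList = [] ∨ -(line.toList.length : Int) ≤ col
instance (line : String) (col : Int) : Decidable (Pre_word_at_py line col) := by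
  unfold Pre_word_at_py; infer_instance

def pvWitness_word_at_py : String × Int := ("foo bar", 5)

-- For a negative in-range col that lands (after Python's negative-index wraparound) on a word
-- character, A returns an accidental slice (the empty string or a wrapped word, e.g. 'a'
-- for ('a', -1)); B returns None, the intended answer for an invalid column position.
def D_word_at_py (line : String) (col : Int) : Prop :=
  line.toList ≠ [] ∧ -(line.toList.length : Int) ≤ col ∧ col < 0 ∧
    (PySem.Chars.isalnum (line.toList.getD (col + line.toList.length).toNat ' ')
      || (line.toList.getD (col + line.toList.length).toNat ' ' == '_')) = true
instance (line : String) (col : Int) : Decidable (D_word_at_py line col) := by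
  unfold D_word_at_py; infer_instance

def Spec_word_at_py (line : String) (col : Int) (out : Option String) : Prop :=
  ¬ D_word_at_py line col → out = word_at_py_alt line col
instance (line : String) (col : Int) (out : Option String) : Decidable (Spec_word_at_py line col out) := by
  unfold Spec_word_at_py; infer_instance

def pvDiffWitness_word_at_py : String × Int := ("a", -1)
def pvDiffWitnessOut_word_at_py : (Option String) × (Option String) := (some "a", none)

-- ===== CLAIM (what is proved, stated in full; the proofs are below) =====
def Claim_unchanged_word_at_py : Prop := ∀ (line : String) (col : Int), Dom_word_at_py line col → Pre_word_at_py line col → Spec_word_at_py line col (word_at_py line col)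
def Claim_changed_word_at_py : Prop := Dom_word_at_py (pvDiffWitness_word_at_py.1) (pvDiffWitness_word_at_py.2) ∧ Pre_word_at_py (pvDiffWitness_word_at_py.1) (pvDiffWitness_word_at_py.2) ∧ D_word_at_py (pvDiffWitness_word_at_py.1) (pvDiffWitness_word_at_py.2) ∧ word_at_py (pvDiffWitness_word_at_py.1) (pvDiffWitness_word_at_py.2) = pvDiffWitnessOut_word_at_py.1 ∧ word_at_py_alt (pvDiffWitness_word_at_py.1) (pvDiffWitness_word_at_py.2) = pvDiffWitnessOut_word_at_py.2 ∧ pvDiffWitnessOut_word_at_py.1 ≠ pvDiffWitnessOut_word_at_py.2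
def Claim_exact_word_at_py : Prop := ∀ (line : String) (col : Int), Dom_word_at_py line col → Pre_word_at_py line col → D_word_at_py line col → word_at_py line col ≠ word_at_py_alt line col

-- ===== LEMMAS AND PROOFS =====

-- total word-character test at an index (false out of range)
def pvWAt (l : List Char) (k : Nat) : Bool := if h : k < l.length then pvW l[k] else false

theorem pvWAt_lt {l : List Char} {k : Nat} (h : pvWAt l k = true) : k < l.length := by
  by_contra hk; simp [pvWAt, hk] at h

theorem pvWAt_eq {l : List Char} {k : Nat} (h : k < l.length) : pvWAt l k = pvW l[k] := by
  simp [pvWAt, h]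

-- ----- pvScanW characterisation -----
theorem pvScanW_le_len {l : List Char} {j : Nat} (h : j ≤ l.length) : pvScanW l j ≤ l.length := by
  fun_induction pvScanW l j <;> omega

theorem pvScanW_step {l : List Char} {j : Nat} (h : pvWAt l j = true) :
    pvScanW l j = pvScanW l (j + 1) := by
  have hj := pvWAt_lt h
  rw [pvWAt_eq hj] at h
  rw [pvScanW]; simp [hj, h]

theorem pvScanW_base {l : List Char} {j : Nat} (h : pvWAt l j = false) : pvScanW l j = j := by
  rw [pvScanW]
  by_cases hj : j < l.length
  · rw [pvWAt_eq hj] at h; simp [hj, h]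
  · simp [hj]

theorem pvScanW_word {l : List Char} {j : Nat} :
    ∀ k, j ≤ k → k < pvScanW l j → pvWAt l k = true := by
  fun_induction pvScanW l j with
  | case1 j hj hw ih =>
    intro k hk1 hk2
    rcases Nat.eq_or_lt_of_le hk1 with rfl | hlt
    · exact (pvWAt_eq hj).trans hw
    · exact ih k hlt hk2
  | case2 j hj hw => intro k h1 h2; omega
  | case3 j hj => intro k h1 h2; omega

theorem pvScanW_stop (l : List Char) (j : Nat) : pvWAt l (pvScanW l j) = false := by
  fun_induction pvScanW l j with
  | case1 j hj hw ih => exact ih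
  | case2 j hj hw => rw [pvWAt_eq hj]; simpa using hw
  | case3 j hj => simp [pvWAt, hj]

theorem pvScanW_shift (l : List Char) :
    ∀ d j m, m - j = d → j ≤ m → (∀ k, j ≤ k → k < m → pvWAt l k = true) →
      pvScanW l j = pvScanW l m := by
  intro d
  induction d with
  | zero =>
    intro j m hd hle _
    obtain rfl : j = m := by omega
    rfl
  | succ d ih =>
    intro j m hd hle hrun
    have hjm : j < m := by omega
    rw [pvScanW_step (hrun j le_rfl hjm)]
    exact ih (j + 1) m (by omega) (by omega) (fun k hk1 hk2 => hrun k (by omega) hk2)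

theorem pvScanW_run {l : List Char} {c e : Nat} (hle : c ≤ e)
    (hrun : ∀ k, c ≤ k → k < e → pvWAt l k = true) (hstop : pvWAt l e = false) :
    pvScanW l c = e := by
  rw [pvScanW_shift l (e - c) c e rfl hle hrun, pvScanW_base hstop]

-- ----- backward scan of A, Nat form -----
def pvBackN (l : List Char) (c : Nat) : Nat :=
  if 0 < c ∧ pvWAt l (c - 1) = true then pvBackN l (c - 1) else c
termination_by c
decreasing_by omega

theorem pvBackN_le (l : List Char) (c : Nat) : pvBackN l c ≤ c := by
  fun_induction pvBackN l c <;> omega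

theorem pvBackN_step {l : List Char} {c : Nat} (h : 0 < c ∧ pvWAt l (c - 1) = true) :
    pvBackN l c = pvBackN l (c - 1) := by
  rw [pvBackN, if_pos h]

theorem pvBackN_gt {l : List Char} {c m : Nat} (hm : m < c) (hw : pvWAt l m = false) :
    m + 1 ≤ pvBackN l c := by
  fun_induction pvBackN l c with
  | case1 c h ih =>
    rcases Nat.lt_or_ge m (c - 1) with hlt | hge
    · exact ih hlt
    · have hk : m = c - 1 := by omega
      rw [hk, h.2] at hw
      exact absurd hw (by simp)
  | case2 c h => omega

theorem pvBackN_le_of_run (l : List Char) :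
    ∀ d i c, c - i = d → i ≤ c → (∀ k, i ≤ k → k < c → pvWAt l k = true) →
      pvBackN l c ≤ i := by
  intro d
  induction d with
  | zero =>
    intro i c hd hle _
    have := pvBackN_le l c
    omega
  | succ d ih =>
    intro i c hd hle hrun
    have hic : i < c := by omega
    rw [pvBackN_step ⟨by omega, hrun (c - 1) (by omega) (by omega)⟩]
    exact ih i (c - 1) (by omega) (by omega) (fun k h1 h2 => hrun k h1 (by omega))

theorem pvBackN_eq_of {l : List Char} {s c : Nat} (hle : s ≤ c)
    (hrun : ∀ k, s ≤ k → k < c → pvWAt l k = true)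
    (hb : s = 0 ∨ pvWAt l (s - 1) = false) : pvBackN l c = s := by
  have h1 : pvBackN l c ≤ s := pvBackN_le_of_run l (c - s) s c rfl hle hrun
  have h2 : s ≤ pvBackN l c := by
    rcases hb with rfl | hb
    · omega
    · rcases Nat.eq_zero_or_pos s with rfl | hs
      · omega
      · have := pvBackN_gt (c := c) (m := s - 1) (by omega) hb
        omega
  omega

-- ----- bridges between A's Int loops and the Nat forms -----
theorem pvABack_natCast (l : List Char) (c : Nat) : pvABack l (c : Int) = (pvBackN l c : Int) := by
  fun_induction pvBackN l c with
  | case1 c h ih =>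
    obtain ⟨hc, hw⟩ := h
    have hlt := pvWAt_lt hw
    rw [pvWAt_eq hlt] at hw
    rw [pvABack]
    have hcast : ((c : Int) - 1) = ((c - 1 : Nat) : Int) := by omega
    have hget : PySem.List.pyGet? l ((c : Int) - 1) = some l[c - 1] := by
      rw [hcast, PySem.List.pyGet?_natCast]
      simp [List.getElem?_eq_getElem hlt]
    rw [dif_pos ⟨by exact_mod_cast hc, by simp [hget, hw]⟩]
    rw [hcast, ih]
  | case2 c h =>
    rw [pvABack, dif_neg]
    intro ⟨h1, h2⟩
    apply h
    have hc : 0 < c := by exact_mod_cast h1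
    refine ⟨hc, ?_⟩
    have hcast : ((c : Int) - 1) = ((c - 1 : Nat) : Int) := by omega
    rw [hcast, PySem.List.pyGet?_natCast] at h2
    by_cases hlt : c - 1 < l.length
    · rw [pvWAt_eq hlt]
      simpa [List.getElem?_eq_getElem hlt] using h2
    · have hn : l[c - 1]? = none := by rw [List.getElem?_eq_none_iff]; omega
      rw [hn] at h2
      simp at h2

theorem pvAFwd_natCast (l : List Char) (e : Nat) : pvAFwd l (e : Int) = (pvScanW l e : Int) := by
  fun_induction pvScanW l e with
  | case1 j hj hw ih =>
    rw [pvAFwd]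
    have hget : PySem.List.pyGet? l (j : Int) = some l[j] := by
      rw [PySem.List.pyGet?_natCast]; simp [List.getElem?_eq_getElem hj]
    rw [dif_pos ⟨by exact_mod_cast hj, by simp [hget, hw]⟩]
    have hcast : ((j : Int) + 1) = ((j + 1 : Nat) : Int) := by omega
    rw [hcast, ih]
  | case2 j hj hw =>
    rw [pvAFwd, dif_neg]
    intro ⟨h1, h2⟩
    have hget : PySem.List.pyGet? l (j : Int) = some l[j] := by
      rw [PySem.List.pyGet?_natCast]; simp [List.getElem?_eq_getElem hj]
    rw [hget] at h2
    simp [h2] at hw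
  | case3 j hj =>
    rw [pvAFwd, dif_neg]
    intro ⟨h1, h2⟩
    exact hj (by exact_mod_cast h1)

theorem pvAFwd_ge (l : List Char) (e : Int) : e ≤ pvAFwd l e := by
  fun_induction pvAFwd l e <;> omega

theorem pvABack_nonpos {l : List Char} {s : Int} (h : s ≤ 0) : pvABack l s = s := by
  rw [pvABack, dif_neg]; intro ⟨h1, _⟩; omega

-- ----- spans characterisation -----
theorem pvSpans_sound (l : List Char) :
    ∀ i s e, (s, e) ∈ pvSpans l i →
      i ≤ s ∧ s < e ∧ e ≤ l.length ∧ (∀ k, s ≤ k → k < e → pvWAt l k = true) ∧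
      (s = i ∨ pvWAt l (s - 1) = false) ∧ pvWAt l e = false := by
  intro i
  fun_induction pvSpans l i with
  | case1 i hi hw j ih =>
    intro s e hmem
    rcases List.mem_cons.mp hmem with heq | hmem'
    · rw [Prod.mk.injEq] at heq
      obtain ⟨hs, he⟩ := heq
      rw [hs, he]
      have hj1 : i + 1 ≤ j := pvScanW_ge l (i + 1)
      refine ⟨le_rfl, by omega, pvScanW_le_len (l := l) (j := i + 1) (by omega), ?_,
        Or.inl rfl, pvScanW_stop l (i + 1)⟩
      intro k hk1 hk2
      rcases Nat.eq_or_lt_of_le hk1 with rfl | hlt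
      · exact (pvWAt_eq hi).trans hw
      · exact pvScanW_word k hlt hk2
    · obtain ⟨h1, h2, h3, h4, h5, h6⟩ := ih s e hmem'
      have hij : i + 1 ≤ j := pvScanW_ge l (i + 1)
      refine ⟨by omega, h2, h3, h4, ?_, h6⟩
      rcases h5 with hsj | h5
      · have hws : pvWAt l s = true := h4 s le_rfl h2
        have hstop : pvWAt l j = false := pvScanW_stop l (i + 1)
        rw [hsj] at hws
        simp [hws] at hstop
      · exact Or.inr h5
  | case2 i hi hw ih =>
    intro s e hmem
    obtain ⟨h1, h2, h3, h4, h5, h6⟩ := ih s e hmem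
    refine ⟨by omega, h2, h3, h4, ?_, h6⟩
    rcases h5 with rfl | h5
    · refine Or.inr ?_
      have : i + 1 - 1 = i := by omega
      rw [this, pvWAt_eq hi]
      simpa using hw
    · exact Or.inr h5
  | case3 i hi => intro s e hmem; simp at hmem

theorem pvSpans_complete (l : List Char) :
    ∀ i c, i ≤ pvBackN l c → pvWAt l c = true →
      (pvBackN l c, pvScanW l c) ∈ pvSpans l i := by
  intro i
  fun_induction pvSpans l i with
  | case1 i hi hw j ih =>
    intro c hle hc
    by_cases hcj : c < j
    · have hic : i ≤ c := le_trans hle (pvBackN_le l c)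
      have hrun : ∀ k, i ≤ k → k < c → pvWAt l k = true := by
        intro k hk1 hk2
        rcases Nat.eq_or_lt_of_le hk1 with rfl | hlt
        · exact (pvWAt_eq hi).trans hw
        · refine pvScanW_word k hlt ?_
          have hjd : pvScanW l (i + 1) = j := rfl
          have hjd2 : pvScanW l (Nat.succ i) = j := rfl
          omega
      have hback : pvBackN l c = i :=
        le_antisymm (pvBackN_le_of_run l (c - i) i c rfl hic hrun) hle
      have hscan : pvScanW l c = j := by
        have h1 : pvScanW l i = j := pvScanW_step ((pvWAt_eq hi).trans hw)
        rw [← pvScanW_shift l (c - i) i c rfl hic hrun, h1]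
      rw [hback, hscan]
      exact List.mem_cons_self ..
    · push Not at hcj
      have hjc : j < c := by
        rcases Nat.eq_or_lt_of_le hcj with rfl | h
        · have hstop : pvWAt l j = false := pvScanW_stop l (i + 1)
          simp [hc] at hstop
        · exact h
      have hjb : j ≤ pvBackN l c := by
        have := pvBackN_gt hjc (show pvWAt l j = false from pvScanW_stop l (i + 1))
        omega
      exact List.mem_cons_of_mem _ (ih c hjb hc)
  | case2 i hi hw ih =>
    intro c hle hc
    have hwi : pvWAt l i = false := by rw [pvWAt_eq hi]; simpa using hw
    have hic : i < c := by
      rcases Nat.eq_or_lt_of_le (le_trans hle (pvBackN_le l c)) with rfl | h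
      · rw [hwi] at hc; exact absurd hc (by simp)
      · exact h
    exact ih c (pvBackN_gt hic hwi) hc
  | case3 i hi =>
    intro c hle hc
    have h1 := pvWAt_lt hc
    have h2 := pvBackN_le l c
    omega

-- B returns none for any negative column
theorem alt_find_neg {l : List Char} {col : Int} (hcol : col < 0) :
    (pvSpans l 0).find? (fun p => decide ((p.1 : Int) ≤ col ∧ col < (p.2 : Int))) = none := by
  rw [List.find?_eq_none]
  intro p _ hp
  simp only [decide_eq_true_eq] at hp
  have h0 : (0 : Int) ≤ (p.1 : Int) := by positivity
  omega

-- B returns none whenever the (clamped) column is negative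
theorem alt_of_neg (line : String) (col : Int) (h : col < 0) : word_at_py_alt line col = none := by
  unfold word_at_py_alt
  dsimp only
  have h0 : (0 : Int) ≤ (line.toList.length : Int) := by positivity
  have hge : ¬ (col ≥ (line.toList.length : Int)) := by omega
  rw [if_neg hge, alt_find_neg h]

-- the common case: a non-negative in-range (possibly clamped) column
theorem main_nonneg (L : List Char) (cI : Int) (h0 : 0 ≤ cI) (hlt : cI < (L.length : Int)) :
    (match PySem.List.pyGet? L cI with
      | none => none
      | some c =>
        if pvW c = true then
          if pvABack L cI < pvAFwd L cI then
            some (String.ofList (PySem.List.slice L (some (pvABack L cI)) (some (pvAFwd L cI))))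
          else none
        else none)
    = (match (pvSpans L 0).find? (fun p => decide ((p.1 : Int) ≤ cI ∧ cI < (p.2 : Int))) with
      | some p => some (String.ofList ((L.drop p.1).take (p.2 - p.1)))
      | none => none) := by
  have hcn : cI.toNat < L.length := by omega
  have hc : cI = ((cI.toNat : Nat) : Int) := by omega
  rw [hc, PySem.List.pyGet?_natCast, List.getElem?_eq_getElem hcn]
  dsimp only
  set c := cI.toNat with hcdef
  by_cases hw : pvW (L[c]'hcn) = true
  · -- word character at the column: both return the surrounding run
    have hwAt : pvWAt L c = true := by rw [pvWAt_eq hcn]; exact hw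
    have hblt : pvBackN L c ≤ c := pvBackN_le L c
    have hslt : c < pvScanW L c := by
      rw [pvScanW_step hwAt]
      have := pvScanW_ge L (c + 1)
      omega
    rw [hw, if_pos rfl]
    rw [pvABack_natCast, pvAFwd_natCast]
    rw [if_pos (by exact_mod_cast Nat.lt_of_le_of_lt hblt hslt)]
    rw [PySem.List.slice_natCast]
    -- B finds exactly this span
    have hmem := pvSpans_complete L 0 c (Nat.zero_le _) hwAt
    have hP : (decide (((pvBackN L c : Nat) : Int) ≤ ((c : Nat) : Int) ∧ ((c : Nat) : Int) < ((pvScanW L c : Nat) : Int))) = true := by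
      simp only [decide_eq_true_eq]
      exact ⟨by omega, by omega⟩
    have hisSome : ((pvSpans L 0).find? (fun p => decide ((p.1 : Int) ≤ ((c : Nat) : Int) ∧ ((c : Nat) : Int) < (p.2 : Int)))).isSome :=
      List.find?_isSome.mpr ⟨(pvBackN L c, pvScanW L c), hmem, hP⟩
    obtain ⟨y, hy⟩ := Option.isSome_iff_exists.mp hisSome
    have hpy := List.find?_some hy
    have hymem := List.mem_of_find?_eq_some hy
    obtain ⟨-, hylt, -, hrun, hbound, hstop⟩ := pvSpans_sound L 0 y.1 y.2 (by simpa using hymem)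
    simp only [decide_eq_true_eq] at hpy
    obtain ⟨hp1, hp2⟩ := hpy
    have hc1 : y.1 ≤ c := by omega
    have hc2 : c < y.2 := by omega
    have e1 : pvBackN L c = y.1 :=
      pvBackN_eq_of hc1 (fun k hk1 hk2 => hrun k hk1 (by omega)) hbound
    have e2 : pvScanW L c = y.2 :=
      pvScanW_run (by omega) (fun k hk1 hk2 => hrun k (by omega) hk2) hstop
    rw [hy, e1, e2]
  · -- not a word character: A returns none, and no span contains the column
    simp only [Bool.not_eq_true] at hw
    rw [hw]
    simp only [Bool.false_eq_true, if_false]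
    rw [List.find?_eq_none.mpr ?_]
    intro p hp hdec
    simp only [decide_eq_true_eq] at hdec
    have hsound := pvSpans_sound L 0 p.1 p.2 (by simpa using hp)
    have hcw : pvWAt L c = true :=
      hsound.2.2.2.1 c (by omega) (by omega)
    rw [pvWAt_eq hcn, hw] at hcw
    exact absurd hcw (by simp)

-- ===== VERDICT (by name: the statement is the Claim_ definition above) =====
theorem word_at_py_spec : Claim_unchanged_word_at_py := by
  unfold Claim_unchanged_word_at_py Spec_word_at_py
  intro line col hdom hpre hD
  by_cases hnil : line.toList = []
  · simp [word_at_py, word_at_py_alt, hnil, pvSpans]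
  · have hlen : -(line.toList.length : Int) ≤ col := by
      rcases hpre with h | h
      · exact absurd h hnil
      · exact h
    have hlen1 : 1 ≤ line.toList.length := List.length_pos_of_ne_nil hnil
    unfold word_at_py word_at_py_alt
    dsimp only
    set L := line.toList with hL
    rw [if_neg hnil]
    by_cases hge : col ≥ (L.length : Int)
    · -- column past the end: clamped to the last index by both
      rw [if_pos hge]
      have hb0 : (0 : Int) ≤ max 0 ((L.length : Int) - 1) := le_max_left _ _
      have hb1 : max 0 ((L.length : Int) - 1) < (L.length : Int) := by
        rw [max_eq_right (by omega : (0 : Int) ≤ (L.length : Int) - 1)]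
        omega
      exact main_nonneg L _ hb0 hb1
    · rw [if_neg hge]
      by_cases hneg : col < 0
      · -- negative column; outside D_ the wrapped character is not a word character
        have hk : (col + L.length).toNat < L.length := by omega
        have hidx : PySem.List.pyGet? L col = L[(col + L.length).toNat]? := by
          have hkpos : 0 < (-col).toNat := by omega
          have hkle : (-col).toNat ≤ L.length := by omega
          rw [show col = -(((-col).toNat : Nat) : Int) by omega,
              PySem.List.pyGet?_neg_natCast L (-col).toNat hkpos hkle]
          congr 1
          omega
        have hwf : pvW (L[(col + L.length).toNat]'hk) = false := by
          cases htest : pvW (L[(col + L.length).toNat]'hk) with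
          | false => rfl
          | true =>
            exfalso
            apply hD
            unfold D_word_at_py
            refine ⟨hnil, hlen, by omega, ?_⟩
            rw [← hL, List.getD_eq_getElem L ' ' hk]
            unfold pvW at htest
            exact htest
        rw [hidx, List.getElem?_eq_getElem hk]
        dsimp only
        rw [hwf]
        simp only [Bool.false_eq_true, if_false]
        rw [alt_find_neg hneg]
      · exact main_nonneg L col (by omega) (by omega)

theorem word_at_py_changed : Claim_changed_word_at_py := by
  unfold Claim_changed_word_at_py
  refine ⟨by decide, by decide, by decide, ?_, ?_, by decide⟩
  · show word_at_py "a" (-1) = some "a"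
    simp [word_at_py, pvABack, pvAFwd, pvW, PySem.List.pyGet?, PySem.List.slice,
      PySem.Chars.isalnum, PySem.Chars.isalpha, PySem.Chars.isdigit, PySem.List.pyIdx?,
      PySem.Chars.isupper, PySem.Chars.islower, PySem.List.clampIdx]
  · exact alt_of_neg "a" (-1) (by decide)

theorem word_at_py_tight : Claim_exact_word_at_py := by
  unfold Claim_exact_word_at_py
  intro line col hdom hpre hD
  obtain ⟨hne, hge, hneg, hw⟩ := hD
  rw [alt_of_neg line col hneg]
  unfold word_at_py
  dsimp only
  set L := line.toList with hL
  have hlen1 : 1 ≤ L.length := List.length_pos_of_ne_nil hne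
  have h0 : (0 : Int) ≤ (L.length : Int) := by positivity
  have hnc : ¬ (col ≥ (L.length : Int)) := by omega
  rw [if_neg hnc, if_neg hne]
  have hk : (col + L.length).toNat < L.length := by omega
  have hidx : PySem.List.pyGet? L col = L[(col + L.length).toNat]? := by
    have hkpos : 0 < (-col).toNat := by omega
    have hkle : (-col).toNat ≤ L.length := by omega
    rw [show col = -(((-col).toNat : Nat) : Int) by omega,
        PySem.List.pyGet?_neg_natCast L (-col).toNat hkpos hkle]
    congr 1
    omega
  have hwt : pvW (L[(col + L.length).toNat]'hk) = true := by
    have hgd : L.getD (col + L.length).toNat ' ' = L[(col + L.length).toNat]'hk :=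
      List.getD_eq_getElem L ' ' hk
    unfold pvW
    rw [← hgd]
    exact hw
  rw [hidx, List.getElem?_eq_getElem hk]
  dsimp only
  rw [hwt, if_pos rfl]
  have hstep : pvAFwd L col = pvAFwd L (col + 1) := by
    rw [pvAFwd]
    rw [dif_pos ⟨by omega, by rw [hidx, List.getElem?_eq_getElem hk]; exact hwt⟩]
  have hfwd : col < pvAFwd L col := by
    rw [hstep]
    have := pvAFwd_ge L (col + 1)
    omega
  rw [pvABack_nonpos (le_of_lt hneg), if_pos hfwd]
  simp
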